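-- pv_equiv track=rewrite | github.com/Cal-CS-61A-Staff/examtool | examtool/api/convert.py | parse_directive
-- ===== SOURCE A (Python) =====
-- def parse_directive(line):
--     if not any(
--         line.startswith(f"# {x} ")
--         for x in ["BEGIN", "END", "INPUT", "CONFIG", "DEFINE"]
--     ):
--         return None, None, None
--     tokens = line.split(" ", 3)
--     return (
--         tokens[1],
--         tokens[2] if len(tokens) > 2 else "",
--         tokens[3] if len(tokens) > 3 else "",
--     )
-- ===== SOURCE B (Python) =====
-- _DIRECTIVES = frozenset(["BEGIN", "END", "INPUT", "CONFIG", "DEFINE"])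
--
--
-- def parse_directive(line):
--     # single left-to-right scan: locate the first three spaces with find()
--     # and slice the fields out directly; no split, no prefix scans
--     i = line.find(' ')
--     if i == -1 or line[:i] != '#':
--         return None, None, None
--     j = line.find(' ', i + 1)
--     if j == -1 or line[i + 1:j] not in _DIRECTIVES:
--         return None, None, None
--     k = line.find(' ', j + 1)
--     if k == -1:
--         return line[i + 1:j], line[j + 1:], ''
--     return line[i + 1:j], line[j + 1:k], line[k + 1:]
-- ===== Notes on version B (the rewrite author's own statement) =====
-- stated objective: alternative
-- what changed: B never splits the line and never scans the five directive prefixes: it locates the first three spaces with successive find() calls and slices the three fields out of the line directly, validating the leading hash token and the directive name as it goes.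
import Mathlib
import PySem

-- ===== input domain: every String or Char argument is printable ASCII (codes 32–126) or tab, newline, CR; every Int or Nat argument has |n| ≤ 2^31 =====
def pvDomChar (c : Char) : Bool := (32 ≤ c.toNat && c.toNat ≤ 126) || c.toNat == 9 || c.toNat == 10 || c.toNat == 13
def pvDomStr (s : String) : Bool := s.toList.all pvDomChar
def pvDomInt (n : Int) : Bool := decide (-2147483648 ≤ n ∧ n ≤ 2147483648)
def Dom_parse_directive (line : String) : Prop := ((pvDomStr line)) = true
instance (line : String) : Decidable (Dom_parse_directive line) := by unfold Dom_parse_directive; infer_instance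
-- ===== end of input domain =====

-- B locates the first three spaces with find() and slices the fields out directly, instead of A's five startswith prefix scans followed by a split; objective: alternative.


-- ===== PORT A =====
-- tokens = line.split(" ", 3)   (split? never returns none: the separator " " is nonempty)
def pvTokens (line : String) : List String :=
  (PySem.Str.splitMax? line " " 3).getD []

def parse_directive (line : String) : Option String × Option String × Option String :=
  if !((["BEGIN", "END", "INPUT", "CONFIG", "DEFINE"] : List String).any
        (fun x => PySem.Str.startswith line ("# " ++ x ++ " "))) then
    (none, none, none)
  else
    (PySem.List.pyGet? (pvTokens line) 1,
     if 2 < (pvTokens line).length then PySem.List.pyGet? (pvTokens line) 2 else some "",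
     if 3 < (pvTokens line).length then PySem.List.pyGet? (pvTokens line) 3 else some "")

-- ===== PORT B =====
def pvDirectives : PySem.Set String :=
  PySem.Set.ofList ["BEGIN", "END", "INPUT", "CONFIG", "DEFINE"]

def parse_directive_alt (line : String) : Option String × Option String × Option String :=
  let i := PySem.Str.find line " "
  if i == -1 || (PySem.Str.slice line none (some i) != "#") then
    (none, none, none)
  else
    let j := PySem.Str.findFrom line " " (i + 1)
    if j == -1 || !(pvDirectives.contains (PySem.Str.slice line (some (i + 1)) (some j))) then
      (none, none, none)
    else
      let k := PySem.Str.findFrom line " " (j + 1)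
      if k == -1 then
        (some (PySem.Str.slice line (some (i + 1)) (some j)),
         some (PySem.Str.slice line (some (j + 1)) none),
         some "")
      else
        (some (PySem.Str.slice line (some (i + 1)) (some j)),
         some (PySem.Str.slice line (some (j + 1)) (some k)),
         some (PySem.Str.slice line (some (k + 1)) none))

-- ===== PRECONDITION & SPEC =====
def Spec_parse_directive (line : String) (out : Option String × Option String × Option String) : Prop := out = parse_directive_alt line
instance (line : String) (out : Option String × Option String × Option String) : Decidable (Spec_parse_directive line out) := by unfold Spec_parse_directive; infer_instance

-- ===== CLAIM (what is proved, stated in full; the proofs are below) =====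
def Claim_equal_parse_directive : Prop := ∀ (line : String), Dom_parse_directive line → Spec_parse_directive line (parse_directive line)

-- ===== LEMMAS AND PROOFS =====

-- step equations for the split worker (A side)
theorem pvGo_nil (fuel m : Nat) (cur : List Char) (acc : List (List Char)) :
    PySem.Chars.splitOnMax.go [' '] (fuel+1) m [] cur acc = (cur.reverse :: acc).reverse := by
  rw [PySem.Chars.splitOnMax.go]; omega

theorem pvGo_m0 (fuel : Nat) (c : Char) (r cur : List Char) (acc : List (List Char)) :
    PySem.Chars.splitOnMax.go [' '] (fuel+1) 0 (c::r) cur acc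
      = ((cur.reverse ++ c::r) :: acc).reverse := by
  rw [PySem.Chars.splitOnMax.go]; simp

theorem pvGo_zero (fuel : Nat) (l cur : List Char) (acc : List (List Char)) :
    PySem.Chars.splitOnMax.go [' '] (fuel+1) 0 l cur acc
      = ((cur.reverse ++ l) :: acc).reverse := by
  cases l with
  | nil => rw [pvGo_nil]; simp
  | cons c r => exact pvGo_m0 fuel c r cur acc

theorem pvGo_sep (fuel m : Nat) (r cur : List Char) (acc : List (List Char)) :
    PySem.Chars.splitOnMax.go [' '] (fuel+1) (m+1) (' '::r) cur acc
      = PySem.Chars.splitOnMax.go [' '] fuel m r [] (cur.reverse :: acc) := by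
  rw [PySem.Chars.splitOnMax.go]; simp [List.isPrefixOf]

theorem pvGo_nonsep (fuel m : Nat) (c : Char) (r cur : List Char) (acc : List (List Char))
    (hc : c ≠ ' ') :
    PySem.Chars.splitOnMax.go [' '] (fuel+1) (m+1) (c::r) cur acc
      = PySem.Chars.splitOnMax.go [' '] fuel (m+1) r (c :: cur) acc := by
  rw [PySem.Chars.splitOnMax.go]; simp [List.isPrefixOf, Ne.symm hc]

-- consuming a space-free block
theorem pvGo_consume (l : List Char) (hl : ∀ c ∈ l, c ≠ ' ') :
    ∀ (fuel m : Nat) (r cur : List Char) (acc : List (List Char)),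
      l.length + r.length < fuel →
      PySem.Chars.splitOnMax.go [' '] fuel (m+1) (l ++ r) cur acc
        = PySem.Chars.splitOnMax.go [' '] (fuel - l.length) (m+1) r (l.reverse ++ cur) acc := by
  induction l with
  | nil => intro fuel m r cur acc _; simp
  | cons c l ih =>
      intro fuel m r cur acc hf
      cases fuel with
      | zero => simp at hf
      | succ f =>
          rw [List.cons_append, pvGo_nonsep _ _ _ _ _ _ (hl c (by simp))]
          rw [ih (fun d hd => hl d (by simp [hd])) f m r (c :: cur) acc (by simp at hf; omega)]
          simp [Nat.succ_sub_succ]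

-- the last field with one split left
theorem pvGo1_nospace (r : List Char) (hr : ∀ c ∈ r, c ≠ ' ')
    (fuel : Nat) (h : r.length < fuel) (acc : List (List Char)) :
    PySem.Chars.splitOnMax.go [' '] fuel 1 r [] acc = acc.reverse ++ [r] := by
  have := pvGo_consume r hr fuel 0 [] [] acc (by simpa using h)
  rw [List.append_nil] at this
  rw [this]
  obtain ⟨g, hg⟩ : ∃ g, fuel - r.length = g + 1 := ⟨fuel - r.length - 1, by omega⟩
  rw [hg, pvGo_nil]
  simp

theorem pvGo1_space (u v : List Char) (hu : ∀ c ∈ u, c ≠ ' ')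
    (fuel : Nat) (h : u.length + v.length + 1 < fuel) (acc : List (List Char)) :
    PySem.Chars.splitOnMax.go [' '] fuel 1 (u ++ ' ' :: v) [] acc
      = acc.reverse ++ [u, v] := by
  have := pvGo_consume u hu fuel 0 (' ' :: v) [] acc (by simp; omega)
  rw [this]
  obtain ⟨g, hg⟩ : ∃ g, fuel - u.length = g + 1 + 1 := ⟨fuel - u.length - 2, by omega⟩
  rw [hg, pvGo_sep, pvGo_zero]
  simp

-- the full split of a well-shaped line, down to the last field
theorem pvSplit3_steps (x r : List Char) (hx : ∀ c ∈ x, c ≠ ' ') :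
    PySem.Chars.splitOnMax ('#' :: ' ' :: (x ++ ' ' :: r)) [' '] 3
      = PySem.Chars.splitOnMax.go [' '] (r.length + 1) 1 r [] [x, ['#']] := by
  rw [PySem.Chars.splitOnMax]
  norm_num
  rw [show x.length + (r.length + 1) + 1 + 1 + 1 = (x.length + r.length + 3) + 1 by omega]
  rw [show Int.toNat 3 = 2 + 1 from rfl]
  rw [pvGo_nonsep _ 2 _ _ _ _ (by decide)]
  rw [show x.length + r.length + 3 = (x.length + r.length + 2) + 1 from rfl]
  rw [show (2 : Nat) + 1 = 1 + 1 + 1 from rfl, pvGo_sep]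
  rw [pvGo_consume x hx (x.length + r.length + 2) 1 (' ' :: r) [] _ (by simp; omega)]
  rw [show x.length + r.length + 2 - x.length = (r.length + 1) + 1 by omega]
  rw [pvGo_sep]
  simp

-- ---- find / findFrom characterisations (B side) ----

theorem pvPrefixSp (l : List Char) : ([' '] <+: l) ↔ l.head? = some ' ' := by
  cases l with
  | nil => simp
  | cons c t =>
      constructor
      · rintro ⟨w, hw⟩
        simp at hw
        simp [hw.1.symm]
      · intro h
        simp at h
        exact ⟨t, by simp [h]⟩

theorem pvFind_eq (s : List Char) (p : Nat) (hs : s[p]? = some ' ')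
    (hmin : ∀ c ∈ s.take p, c ≠ ' ') : PySem.Chars.find s [' '] = (p : Int) := by
  obtain ⟨hplen, hgp⟩ := List.getElem?_eq_some_iff.mp hs
  have hdrop : s.drop p = ' ' :: s.drop (p + 1) := by
    rw [List.drop_eq_getElem_cons hplen, hgp]
  have hinf : [' '] <:+: s := ⟨s.take p, s.drop (p + 1), by
    rw [List.append_assoc]
    have := List.take_append_drop p s
    rw [hdrop] at this
    simpa using this⟩
  have hnn : 0 ≤ PySem.Chars.find s [' '] := (PySem.Chars.find_nonneg_iff s [' ']).mpr hinf
  have hpre : [' '] <+: s.drop p := by rw [hdrop]; exact ⟨_, rfl⟩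
  obtain ⟨hat, hm⟩ := PySem.Chars.find_spec hnn
  set q := (PySem.Chars.find s [' ']).toNat with hq
  rcases Nat.lt_trichotomy q p with hlt | heq | hgt
  · exfalso
    rw [pvPrefixSp, List.head?_drop] at hat
    obtain ⟨hqlen, hq'⟩ := List.getElem?_eq_some_iff.mp hat
    have hmem : s[q] ∈ s.take p := by
      have hlt' : q < (s.take p).length := by simp; omega
      have : (s.take p)[q]'hlt' = s[q] := List.getElem_take
      rw [← this]
      exact List.getElem_mem hlt'
    exact hmin _ hmem hq'
  · omega
  · exact absurd hpre (hm p hgt)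

theorem pvFind_nospace (s : List Char) (h : ∀ c ∈ s, c ≠ ' ') :
    PySem.Chars.find s [' '] = -1 := by
  rw [PySem.Chars.find_eq_neg_one_iff]
  intro hinf
  exact h ' ' (hinf.sublist.subset (by simp)) rfl

theorem pvFind_app (u v : List Char) (hu : ∀ c ∈ u, c ≠ ' ') :
    PySem.Chars.find (u ++ ' ' :: v) [' '] = (u.length : Int) := by
  apply pvFind_eq
  · rw [List.getElem?_append_right (le_refl _)]
    simp
  · intro c hc
    rw [List.take_left] at hc
    exact hu c hc

-- every list is space-free or splits at its first space
theorem pvFirstSpace (s : List Char) :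
    (∀ c ∈ s, c ≠ ' ') ∨ ∃ u v, s = u ++ ' ' :: v ∧ ∀ c ∈ u, c ≠ ' ' := by
  induction s with
  | nil => exact Or.inl (by simp)
  | cons c t ih =>
      by_cases hc : c = ' '
      · exact Or.inr ⟨[], t, by simp [hc], by simp⟩
      · rcases ih with h | ⟨u, v, rfl, hu⟩
        · exact Or.inl (by
            intro d hd
            rcases List.mem_cons.mp hd with rfl | hd
            · exact hc
            · exact h d hd)
        · exact Or.inr ⟨c :: u, v, by simp, by
            intro d hd
            rcases List.mem_cons.mp hd with rfl | hd
            · exact hc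
            · exact hu d hd⟩

-- ---- the directive set ----
def pvDirsC : List (List Char) :=
  [['B','E','G','I','N'], ['E','N','D'], ['I','N','P','U','T'],
   ['C','O','N','F','I','G'], ['D','E','F','I','N','E']]

theorem pvDirs_map : pvDirsC.map String.ofList = ["BEGIN", "END", "INPUT", "CONFIG", "DEFINE"] := by
  decide

theorem pvDirectives_eq : pvDirectives = ["BEGIN", "END", "INPUT", "CONFIG", "DEFINE"] := by
  decide

theorem pvDirs_nospace (x : List Char) (hx : x ∈ pvDirsC) : ∀ c ∈ x, c ≠ ' ' := by
  have hall : (x.all (· != ' ')) = true := by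
    simp only [pvDirsC, List.mem_cons, List.not_mem_nil, or_false] at hx
    rcases hx with rfl|rfl|rfl|rfl|rfl <;> decide
  intro c hc
  have h := List.all_eq_true.mp hall c hc
  simpa using h

theorem pvOfList_inj {a b : List Char} (h : String.ofList a = String.ofList b) : a = b := by
  have := congrArg String.toList h
  simpa using this

theorem pvContains_iff (x : List Char) :
    pvDirectives.contains (String.ofList x) = true ↔ x ∈ pvDirsC := by
  rw [pvDirectives_eq, ← pvDirs_map]
  constructor
  · intro h
    simp only [PySem.Set.contains, List.contains_eq_mem, decide_eq_true_eq] at h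
    obtain ⟨y, hy, hye⟩ := List.mem_map.mp h
    rwa [← pvOfList_inj hye]
  · intro h
    simp only [PySem.Set.contains, List.contains_eq_mem, decide_eq_true_eq]
    exact List.mem_map_of_mem h

-- A's guard, characterised by the shape of the line
set_option maxRecDepth 4000 in
theorem pvAguard (line : String) :
    ((["BEGIN", "END", "INPUT", "CONFIG", "DEFINE"] : List String).any
        (fun x => PySem.Str.startswith line ("# " ++ x ++ " "))) = true ↔
      ∃ x ∈ pvDirsC, ∃ r, line.toList = '#' :: ' ' :: (x ++ ' ' :: r) := by
  rw [List.any_eq_true]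
  constructor
  · rintro ⟨x, hxm, hsw⟩
    have hx : x.toList ∈ pvDirsC := by
      simp only [List.mem_cons, List.not_mem_nil, or_false] at hxm
      rcases hxm with rfl|rfl|rfl|rfl|rfl <;> decide
    have hpre : ('#' :: ' ' :: (x.toList ++ [' '])) <+: line.toList := by
      rw [PySem.Str.startswith_eq] at hsw
      have h1 := (PySem.Chars.startswith_iff _ _).mp hsw
      have he : ("# " ++ x ++ " ").toList = '#' :: ' ' :: (x.toList ++ [' ']) := by
        simp only [List.mem_cons, List.not_mem_nil, or_false] at hxm
        rcases hxm with rfl|rfl|rfl|rfl|rfl <;> decide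
      rwa [he] at h1
    obtain ⟨r, hr⟩ := hpre
    exact ⟨x.toList, hx, r, by rw [← hr]; simp⟩
  · rintro ⟨x, hx, r, hline⟩
    have hpre : ('#' :: ' ' :: (x ++ [' '])) <+: line.toList := ⟨r, by rw [hline]; simp⟩
    fin_cases hx
    · exact ⟨"BEGIN", by decide, by rw [PySem.Str.startswith_eq]; exact (PySem.Chars.startswith_iff _ _).mpr hpre⟩
    · exact ⟨"END", by decide, by rw [PySem.Str.startswith_eq]; exact (PySem.Chars.startswith_iff _ _).mpr hpre⟩
    · exact ⟨"INPUT", by decide, by rw [PySem.Str.startswith_eq]; exact (PySem.Chars.startswith_iff _ _).mpr hpre⟩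
    · exact ⟨"CONFIG", by decide, by rw [PySem.Str.startswith_eq]; exact (PySem.Chars.startswith_iff _ _).mpr hpre⟩
    · exact ⟨"DEFINE", by decide, by rw [PySem.Str.startswith_eq]; exact (PySem.Chars.startswith_iff _ _).mpr hpre⟩

-- pvTokens is the char-level split, mapped back to strings
theorem pvTokens_eq (line : String) :
    pvTokens line = (PySem.Chars.splitOnMax line.toList [' '] 3).map String.ofList := rfl

-- the valid shape, fully evaluated on both sides
theorem pvValid (line : String) (x r : List Char) (hx : x ∈ pvDirsC)
    (hline : line.toList = '#' :: ' ' :: (x ++ ' ' :: r)) :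
    parse_directive line = parse_directive_alt line := by
  have hxs := pvDirs_nospace x hx
  have hA := (pvAguard line).mpr ⟨x, hx, r, hline⟩
  -- B: first space is at index 1, and line[:1] = "#"
  have hfind : PySem.Str.find line " " = 1 := by
    rw [PySem.Str.find_eq, show (" " : String).toList = [' '] from rfl, hline]
    have := pvFind_eq ('#' :: ' ' :: (x ++ ' ' :: r)) 1 rfl (by intro c hc; simp at hc; simp [hc])
    simpa using this
  have hslice1 : PySem.Str.slice line none (some 1) = "#" := by
    apply String.toList_inj.mp
    rw [PySem.Str.toList_slice, PySem.Chars.slice_eq_listSlice,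
      PySem.List.slice_to line.toList (by norm_num), hline]
    rfl
  -- B: second space is right after the directive
  have hdrop2 : line.toList.drop 2 = x ++ ' ' :: r := by rw [hline]; rfl
  have hj : PySem.Str.findFrom line " " (1 + 1) = 2 + (x.length : Int) := by
    rw [PySem.Str.findFrom_eq, show (" " : String).toList = [' '] from rfl,
      show (1 : Int) + 1 = ((2 : Nat) : Int) by norm_num,
      PySem.Chars.findFrom_natCast line.toList [' '] 2 (by rw [hline]; simp),
      hdrop2, pvFind_app x r hxs]
    rw [if_neg (by omega)]
    norm_num
  have hslice2 : PySem.Str.slice line (some (1 + 1)) (some (2 + (x.length : Int)))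
      = String.ofList x := by
    apply String.toList_inj.mp
    rw [PySem.Str.toList_slice, PySem.Chars.slice_eq_listSlice,
      PySem.List.slice_toNat line.toList (by norm_num) (by positivity),
      show ((1 : Int) + 1).toNat = 2 by omega,
      show ((2 : Int) + (x.length : Int)).toNat = 2 + x.length by omega,
      hdrop2, String.toList_ofList]
    rw [show 2 + x.length - 2 = x.length by omega]
    exact List.take_left
  -- the directive passes B's membership test
  have hmem : pvDirectives.contains (String.ofList x) = true := (pvContains_iff x).mpr hx
  -- third space: split on the shape of the rest of the line
  have hdrop3 : line.toList.drop (x.length + 3) = r := by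
    have hshape : line.toList = (['#', ' '] ++ x ++ [' ']) ++ r := by rw [hline]; simp
    have hlen' : (['#', ' '] ++ x ++ [' ']).length = x.length + 3 := by simp
    rw [hshape, ← hlen', List.drop_left]
  have hlen : x.length + 3 ≤ line.toList.length := by rw [hline]; simp
  have hkarg : (2 : Int) + (x.length : Int) + 1 = ((x.length + 3 : Nat) : Int) := by push_cast; ring
  have htok := pvTokens_eq line
  rw [hline, pvSplit3_steps x r hxs] at htok
  rcases pvFirstSpace r with hr | ⟨u, v, rfl, hu⟩
  · -- no further space: three tokens, B's third find returns -1
    have hk : PySem.Str.findFrom line " " (2 + (x.length : Int) + 1) = -1 := by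
      rw [PySem.Str.findFrom_eq, show (" " : String).toList = [' '] from rfl, hkarg,
        PySem.Chars.findFrom_natCast line.toList [' '] (x.length + 3) hlen,
        hdrop3, pvFind_nospace r hr]
      simp
    have hslice3 : PySem.Str.slice line (some (2 + (x.length : Int) + 1)) none
        = String.ofList r := by
      apply String.toList_inj.mp
      rw [PySem.Str.toList_slice, PySem.Chars.slice_eq_listSlice,
        PySem.List.slice_from line.toList (by positivity),
        show ((2 : Int) + (x.length : Int) + 1).toNat = x.length + 3 by omega,
        hdrop3, String.toList_ofList]
    rw [pvGo1_nospace r hr (r.length + 1) (by omega) [x, ['#']]] at htok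
    simp only [parse_directive_alt, hfind, hslice1, hj, hslice2, hmem, hk]
    simp only [parse_directive, hA]
    rw [hslice3]
    simp [htok, PySem.List.pyGet?, PySem.List.pyIdx?,
      show ¬((2 : Int) + (x.length : Int) = -1) by omega]
  · -- a third space exists: four tokens, B slices the middle and the tail
    have hfr : PySem.Chars.find (u ++ ' ' :: v) [' '] = (u.length : Int) := pvFind_app u v hu
    have hk : PySem.Str.findFrom line " " (2 + (x.length : Int) + 1)
        = ((x.length + 3 + u.length : Nat) : Int) := by
      rw [PySem.Str.findFrom_eq, show (" " : String).toList = [' '] from rfl, hkarg,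
        PySem.Chars.findFrom_natCast line.toList [' '] (x.length + 3) hlen,
        hdrop3, hfr]
      rw [if_neg (by omega)]
      push_cast; ring
    have hdrop4 : line.toList.drop (x.length + 3 + u.length + 1) = v := by
      have hshape : line.toList = (['#', ' '] ++ x ++ [' '] ++ u ++ [' ']) ++ v := by
        rw [hline]; simp
      have hlen' : (['#', ' '] ++ x ++ [' '] ++ u ++ [' ']).length
          = x.length + 3 + u.length + 1 := by simp; omega
      rw [hshape, ← hlen', List.drop_left]
    have hslice3 : PySem.Str.slice line (some (2 + (x.length : Int) + 1))
        (some ((x.length + 3 + u.length : Nat) : Int)) = String.ofList u := by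
      apply String.toList_inj.mp
      rw [PySem.Str.toList_slice, PySem.Chars.slice_eq_listSlice,
        PySem.List.slice_toNat line.toList (by positivity) (by positivity),
        show ((2 : Int) + (x.length : Int) + 1).toNat = x.length + 3 by omega,
        show (((x.length + 3 + u.length : Nat) : Int)).toNat = x.length + 3 + u.length by omega,
        hdrop3, String.toList_ofList,
        show x.length + 3 + u.length - (x.length + 3) = u.length by omega]
      exact List.take_left
    have hslice4 : PySem.Str.slice line (some (((x.length + 3 + u.length : Nat) : Int) + 1)) none
        = String.ofList v := by
      apply String.toList_inj.mp
      rw [PySem.Str.toList_slice, PySem.Chars.slice_eq_listSlice,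
        PySem.List.slice_from line.toList (by positivity),
        show ((((x.length + 3 + u.length : Nat) : Int)) + 1).toNat
          = x.length + 3 + u.length + 1 by omega,
        hdrop4, String.toList_ofList]
    rw [pvGo1_space u v hu ((u ++ ' ' :: v).length + 1) (by simp) [x, ['#']]] at htok
    simp only [parse_directive_alt, hfind, hslice1, hj, hslice2, hmem, hk]
    simp only [parse_directive, hA]
    rw [hslice3, hslice4]
    simp [htok, PySem.List.pyGet?, PySem.List.pyIdx?,
      show ¬((2 : Int) + (x.length : Int) = -1) by omega]
    intro hcontr
    exfalso
    omega

-- ===== VERDICT (by name: the statement is the Claim_ definition above) =====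
theorem parse_directive_spec : Claim_equal_parse_directive := by
  intro line _
  unfold Spec_parse_directive
  by_cases hval : ∃ x ∈ pvDirsC, ∃ r, line.toList = '#' :: ' ' :: (x ++ ' ' :: r)
  · obtain ⟨x, hx, r, hline⟩ := hval
    exact pvValid line x r hx hline
  · -- invalid: A's guard is false, and B's guards cannot all pass
    have hA : ((["BEGIN", "END", "INPUT", "CONFIG", "DEFINE"] : List String).any
        (fun x => PySem.Str.startswith line ("# " ++ x ++ " "))) = false :=
      Bool.eq_false_iff.mpr (fun h => hval ((pvAguard line).mp h))
    have hBnone : parse_directive_alt line = (none, none, none) := by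
      by_cases hg1 : (PySem.Str.find line " " == -1
          || (PySem.Str.slice line none (some (PySem.Str.find line " ")) != "#")) = true
      · simp only [parse_directive_alt]
        rw [if_pos hg1]
      · by_cases hg2 : (PySem.Str.findFrom line " " (PySem.Str.find line " " + 1) == -1
            || !(pvDirectives.contains (PySem.Str.slice line
                  (some (PySem.Str.find line " " + 1))
                  (some (PySem.Str.findFrom line " " (PySem.Str.find line " " + 1)))))) = true
        · simp only [parse_directive_alt]
          rw [if_neg hg1, if_pos hg2]
        · exfalso
          apply hval
          simp only [Bool.or_eq_true, beq_iff_eq, bne_iff_ne, ne_eq, not_or, not_not,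
            Bool.not_eq_true] at hg1 hg2
          obtain ⟨hne1, hsl⟩ := hg1
          obtain ⟨hne2, hcont⟩ := hg2
          have hcont' : pvDirectives.contains (PySem.Str.slice line
              (some (PySem.Str.find line " " + 1))
              (some (PySem.Str.findFrom line " " (PySem.Str.find line " " + 1)))) = true := by
            revert hcont
            cases pvDirectives.contains (PySem.Str.slice line
              (some (PySem.Str.find line " " + 1))
              (some (PySem.Str.findFrom line " " (PySem.Str.find line " " + 1)))) <;> simp
          have hfeq : PySem.Str.find line " " = PySem.Chars.find line.toList [' '] := by
            rw [PySem.Str.find_eq, show (" " : String).toList = [' '] from rfl]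
          have hnn : 0 ≤ PySem.Chars.find line.toList [' '] := by
            have h1 := PySem.Chars.neg_one_le_find line.toList [' ']
            rw [hfeq] at hne1
            omega
          obtain ⟨hat, hmin⟩ := PySem.Chars.find_spec hnn
          set t := (PySem.Chars.find line.toList [' ']).toNat with ht
          have hf : PySem.Chars.find line.toList [' '] = (t : Int) :=
            (Int.toNat_of_nonneg hnn).symm
          have htake : line.toList.take t = ['#'] := by
            have h2 := congrArg String.toList hsl
            rw [PySem.Str.toList_slice, PySem.Chars.slice_eq_listSlice, hfeq,
              PySem.List.slice_to line.toList hnn] at h2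
            exact h2
          have hsp : line.toList[t]? = some ' ' := by
            rw [← List.head?_drop, ← pvPrefixSp]; exact hat
          have htlen : t < line.toList.length := (List.getElem?_eq_some_iff.mp hsp).1
          have hlen1 : min t line.toList.length = 1 := by
            have h3 := congrArg List.length htake; simpa using h3
          have ht1 : t = 1 := by omega
          have hshape : line.toList = '#' :: ' ' :: line.toList.drop 2 := by
            cases hcs : line.toList with
            | nil => rw [hcs] at htlen; simp at htlen
            | cons a l =>
                cases hl : l with
                | nil =>
                    rw [hcs, hl, ht1] at htlen; simp at htlen
                | cons b m =>
                    rw [hcs, hl, ht1] at htake hsp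
                    simp at htake hsp
                    simp [htake, hsp]
          have hfQ : PySem.Str.find line " " = 1 := by
            rw [hfeq, hf, ht1]; norm_num
          -- second guard: the space after the directive
          have h2len : 2 ≤ line.toList.length := by rw [hshape]; simp
          have hffrom := PySem.Chars.findFrom_natCast line.toList [' '] 2 h2len
          have hjeq : PySem.Str.findFrom line " " (PySem.Str.find line " " + 1)
              = PySem.Chars.findFrom line.toList [' '] ((2 : Nat) : Int) := by
            rw [PySem.Str.findFrom_eq, show (" " : String).toList = [' '] from rfl, hfQ]
            norm_num
          have hne2' : PySem.Chars.find (line.toList.drop 2) [' '] ≠ -1 := by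
            intro hzero
            rw [hjeq, hffrom, if_pos hzero] at hne2
            exact hne2 rfl
          have hnn2 : 0 ≤ PySem.Chars.find (line.toList.drop 2) [' '] := by
            have h4 := PySem.Chars.neg_one_le_find (line.toList.drop 2) [' ']
            omega
          obtain ⟨hat2, hmin2⟩ := PySem.Chars.find_spec hnn2
          set p := (PySem.Chars.find (line.toList.drop 2) [' ']).toNat with hp
          have hf2 : PySem.Chars.find (line.toList.drop 2) [' '] = (p : Int) :=
            (Int.toNat_of_nonneg hnn2).symm
          have hsp2 : (line.toList.drop 2)[p]? = some ' ' := by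
            rw [← List.head?_drop, ← pvPrefixSp]; exact hat2
          obtain ⟨hplen, hgp2⟩ := List.getElem?_eq_some_iff.mp hsp2
          have hxns : ∀ c ∈ (line.toList.drop 2).take p, c ≠ ' ' := by
            intro c hc hcsp
            obtain ⟨n, hn, hgn⟩ := List.getElem_of_mem hc
            have hnp : n < p := by
              have := hn; simp at this; omega
            have hgn' : (line.toList.drop 2)[n]'(by omega) = c := by
              rw [← hgn]; exact (List.getElem_take).symm
            apply hmin2 n hnp
            rw [pvPrefixSp, List.head?_drop, List.getElem?_eq_getElem (by omega), hgn', hcsp]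
          have hjval : PySem.Str.findFrom line " " (PySem.Str.find line " " + 1)
              = ((2 + p : Nat) : Int) := by
            rw [hjeq, hffrom, if_neg hne2', hf2]
            push_cast; ring
          have hslx : PySem.Str.slice line (some (PySem.Str.find line " " + 1))
              (some (PySem.Str.findFrom line " " (PySem.Str.find line " " + 1)))
              = String.ofList ((line.toList.drop 2).take p) := by
            apply String.toList_inj.mp
            rw [PySem.Str.toList_slice, PySem.Chars.slice_eq_listSlice, hjval, hfQ,
              PySem.List.slice_toNat line.toList (by norm_num) (by positivity),
              show ((1 : Int) + 1).toNat = 2 by omega,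
              show (((2 + p : Nat) : Int)).toNat = 2 + p by omega,
              String.toList_ofList]
            congr 1
            omega
          have hxdir : (line.toList.drop 2).take p ∈ pvDirsC := by
            rw [← pvContains_iff, ← hslx]
            exact hcont'
          have hx2 : line.toList.drop 2
              = (line.toList.drop 2).take p ++ ' ' :: (line.toList.drop 2).drop (p + 1) := by
            conv_lhs => rw [← List.take_append_drop p (line.toList.drop 2)]
            congr 1
            rw [List.drop_eq_getElem_cons hplen, hgp2]
          refine ⟨(line.toList.drop 2).take p, hxdir, (line.toList.drop 2).drop (p + 1), ?_⟩
          rw [← hx2]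
          exact hshape
    rw [hBnone]
    unfold parse_directive
    rw [hA]
    rfl
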